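-- pv_equiv track=rewrite | github.com/nileshgupta1/NeuralHire | main.py | create_dummy_job_openings
-- ===== SOURCE A (Python) =====
-- def create_dummy_job_openings(num_jobs):
--     job_openings = {
--         "finance": [],
--         "tech": [],
--         "manufacturing": []
--     }
--     for i in range(num_jobs):
--         job = {
--             "title": f"Job {i+1}",
--             "company": f"Company {i+1}",
--             "location": f"Location {i+1}"
--         }
--         domain = ["finance", "tech", "manufacturing"][i % 3]
--         job_openings[domain].append(job)
--     return job_openings
--
-- num_jobs = 15
--
-- job_openings = create_dummy_job_openings(num_jobs)
-- ===== SOURCE B (Python) =====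
-- def create_dummy_job_openings(num_jobs):
--     def job(i):
--         return {
--             "title": f"Job {i+1}",
--             "company": f"Company {i+1}",
--             "location": f"Location {i+1}"
--         }
--     return {
--         "finance": [job(i) for i in range(0, num_jobs, 3)],
--         "tech": [job(i) for i in range(1, num_jobs, 3)],
--         "manufacturing": [job(i) for i in range(2, num_jobs, 3)],
--     }
-- ===== Notes on version B (the rewrite author's own statement) =====
-- stated objective: alternative
-- what changed: Replaces the single pass that dispatches each index to a domain via i % 3 on a pre-built dict with three independent strided passes, one comprehension per domain over range(d, num_jobs, 3).
import Mathlib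
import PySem

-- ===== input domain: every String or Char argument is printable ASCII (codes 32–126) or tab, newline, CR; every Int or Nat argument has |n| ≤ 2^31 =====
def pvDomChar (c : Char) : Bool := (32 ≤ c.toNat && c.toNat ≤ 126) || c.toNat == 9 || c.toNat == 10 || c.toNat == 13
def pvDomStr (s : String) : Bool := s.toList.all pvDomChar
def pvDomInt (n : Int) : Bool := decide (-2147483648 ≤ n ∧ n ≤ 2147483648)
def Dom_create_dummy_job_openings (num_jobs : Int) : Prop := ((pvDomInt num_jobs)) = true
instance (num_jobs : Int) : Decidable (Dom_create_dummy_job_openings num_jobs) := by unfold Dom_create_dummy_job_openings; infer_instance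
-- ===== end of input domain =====

-- B replaces A's single modulo-dispatch pass over a pre-built dict with three independent
-- strided per-domain passes (alternative decomposition, same cost).

-- ===== PORT A =====
def create_dummy_job_openings (num_jobs : Int) : List (String × List (List (String × String))) :=
  let job_openings : PySem.Dict String (List (List (String × String))) :=
    PySem.Dict.ofList [("finance", []), ("tech", []), ("manufacturing", [])]
  let final := (PySem.List.pyRange 0 num_jobs 1).foldl (fun jo i =>
      let job : List (String × String) :=
        [("title", "Job " ++ PySem.Int.toStr (i + 1)),
         ("company", "Company " ++ PySem.Int.toStr (i + 1)),
         ("location", "Location " ++ PySem.Int.toStr (i + 1))]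
      let domain := PySem.List.pyGetD ["finance", "tech", "manufacturing"] (PySem.Int.mod i 3) ""
      jo.modify domain [] (· ++ [job])) job_openings
  final.items

-- ===== PORT B =====
def pvJob (i : Int) : List (String × String) :=
  [("title", "Job " ++ PySem.Int.toStr (i + 1)),
   ("company", "Company " ++ PySem.Int.toStr (i + 1)),
   ("location", "Location " ++ PySem.Int.toStr (i + 1))]

def create_dummy_job_openings_alt (num_jobs : Int) : List (String × List (List (String × String))) :=
  [("finance", (PySem.List.pyRange 0 num_jobs 3).map pvJob),
   ("tech", (PySem.List.pyRange 1 num_jobs 3).map pvJob),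
   ("manufacturing", (PySem.List.pyRange 2 num_jobs 3).map pvJob)]

-- ===== PRECONDITION & SPEC =====
def Spec_create_dummy_job_openings (num_jobs : Int) (out : List (String × List (List (String × String)))) : Prop := out = create_dummy_job_openings_alt num_jobs
instance (num_jobs : Int) (out : List (String × List (List (String × String)))) : Decidable (Spec_create_dummy_job_openings num_jobs out) := by unfold Spec_create_dummy_job_openings; infer_instance

-- ===== CLAIM (what is proved, stated in full; the proofs are below) =====
def Claim_equal_create_dummy_job_openings : Prop := ∀ (num_jobs : Int), Dom_create_dummy_job_openings num_jobs → Spec_create_dummy_job_openings num_jobs (create_dummy_job_openings num_jobs)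

-- ===== LEMMAS AND PROOFS =====

-- A's loop body, named so the fold can be reasoned about.
def pvStepA (jo : PySem.Dict String (List (List (String × String)))) (i : Int) :
    PySem.Dict String (List (List (String × String))) :=
  let job : List (String × String) :=
    [("title", "Job " ++ PySem.Int.toStr (i + 1)),
     ("company", "Company " ++ PySem.Int.toStr (i + 1)),
     ("location", "Location " ++ PySem.Int.toStr (i + 1))]
  let domain := PySem.List.pyGetD ["finance", "tech", "manufacturing"] (PySem.Int.mod i 3) ""
  jo.modify domain [] (· ++ [job])

lemma portA_eq_fold (num_jobs : Int) :
    create_dummy_job_openings num_jobs =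
      ((PySem.List.pyRange 0 num_jobs 1).foldl pvStepA
        (PySem.Dict.ofList [("finance", []), ("tech", []), ("manufacturing", [])])).items := rfl

-- adding one more index to a stride-3 range
lemma stride3_succ (a : Int) (h0 : 0 ≤ a) (h3 : a < 3) (n : Nat) :
    PySem.List.pyRange a ((n : Int) + 1) 3 =
      PySem.List.pyRange a (n : Int) 3 ++ (if (n : Int) % 3 = a then [(n : Int)] else []) := by
  rw [PySem.List.pyRange_of_pos a (n : Int) (by norm_num),
      PySem.List.pyRange_of_pos a ((n : Int) + 1) (by norm_num)]
  by_cases h : (n : Int) % 3 = a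
  · have hc : (if a < (n : Int) + 1 then (((n : Int) + 1 - a + 3 - 1) / 3).toNat else 0)
        = (if a < (n : Int) then (((n : Int) - a + 3 - 1) / 3).toNat else 0) + 1 := by
      split_ifs <;> omega
    rw [hc, List.range_succ, List.map_append]
    simp only [h, List.map_cons, List.map_nil]
    congr 2
    split_ifs with h' <;> omega
  · have hc : (if a < (n : Int) + 1 then (((n : Int) + 1 - a + 3 - 1) / 3).toNat else 0)
        = (if a < (n : Int) then (((n : Int) - a + 3 - 1) / 3).toNat else 0) := by
      split_ifs <;> omega
    rw [hc]
    simp [h]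

-- invariant of A's fold
lemma foldA_eq (n : Nat) :
    (PySem.List.pyRange 0 (n : Int) 1).foldl pvStepA
        (PySem.Dict.ofList [("finance", []), ("tech", []), ("manufacturing", [])]) =
      PySem.Dict.mk
        [("finance", (PySem.List.pyRange 0 (n : Int) 3).map pvJob),
         ("tech", (PySem.List.pyRange 1 (n : Int) 3).map pvJob),
         ("manufacturing", (PySem.List.pyRange 2 (n : Int) 3).map pvJob)] := by
  induction n with
  | zero => decide
  | succ m ih =>
      have hsplit : PySem.List.pyRange 0 ((m : Int) + 1) 1
          = PySem.List.pyRange 0 (m : Int) 1 ++ [(m : Int)] :=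
        PySem.List.pyRange_one_succ_right (by positivity)
      push_cast
      rw [hsplit, List.foldl_append, ih,
          stride3_succ 0 (by norm_num) (by norm_num) m,
          stride3_succ 1 (by norm_num) (by norm_num) m,
          stride3_succ 2 (by norm_num) (by norm_num) m]
      have h3 : (m : Int) % 3 = 0 ∨ (m : Int) % 3 = 1 ∨ (m : Int) % 3 = 2 := by omega
      have hmod : PySem.Int.mod (m : Int) 3 = (m : Int) % 3 :=
        PySem.Int.mod_eq_emod_of_pos (by norm_num)
      simp only [List.foldl_cons, List.foldl_nil, pvStepA, hmod]
      rcases h3 with h | h | h <;>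
        simp [h, PySem.List.pyGetD, PySem.Dict.modify, PySem.Dict.insert, PySem.Dict.getD, PySem.Dict.get?, pvJob]

lemma pyRange_one_nonpos (a : Int) (ha : 0 ≤ a) (b : Int) (hb : b ≤ 0) :
    PySem.List.pyRange a b 3 = [] := by
  rw [PySem.List.pyRange_of_pos a b (by norm_num)]
  have : ¬ a < b := by omega
  simp [this]

-- ===== VERDICT (by name: the statement is the Claim_ definition above) =====
theorem create_dummy_job_openings_spec : Claim_equal_create_dummy_job_openings := by
  intro num_jobs _
  unfold Spec_create_dummy_job_openings
  rw [portA_eq_fold]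
  by_cases h : 0 ≤ num_jobs
  · obtain ⟨n, rfl⟩ := Int.eq_ofNat_of_zero_le h
    rw [foldA_eq]
    rfl
  · rw [PySem.List.pyRange_one_eq_nil (by omega)]
    unfold create_dummy_job_openings_alt
    rw [pyRange_one_nonpos 0 (by norm_num) _ (by omega),
        pyRange_one_nonpos 1 (by norm_num) _ (by omega),
        pyRange_one_nonpos 2 (by norm_num) _ (by omega)]
    decide
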